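-- pv_equiv track=rewrite | github.com/exoplanet-spaceapps/exoplanet-starter | tests/test_all_notebooks_syntax.py | clean_cell_code
-- ===== SOURCE A (Python) =====
-- def clean_cell_code(code: str) -> str:
--     """
--     Clean Jupyter-specific syntax from code.
--
--     Args:
--         code: Raw cell code
--
--     Returns:
--         Cleaned Python code
--     """
--     lines = code.split('\n')
--     cleaned_lines = []
--
--     for line in lines:
--         stripped = line.strip()
--         # Skip Jupyter magic commands
--         if stripped.startswith('!') or stripped.startswith('%'):
--             continue
--         # Skip empty lines at start/end
--         if not stripped and not cleaned_lines:
--             continue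
--         cleaned_lines.append(line)
--
--     return '\n'.join(cleaned_lines)
-- ===== SOURCE B (Python) =====
-- def clean_cell_code(code: str) -> str:
--     """Clean Jupyter magics and leading blanks: locate the first real line by
--     index, then filter magics from that suffix only (slice+filter, no state)."""
--     lines = code.split('\n')
--     start = next((i for i, l in enumerate(lines)
--                   if l.strip() and not l.strip().startswith(('!', '%'))),
--                  len(lines))
--     return '\n'.join(l for l in lines[start:]
--                      if not l.strip().startswith(('!', '%')))
-- ===== Notes on version B (the rewrite author's own statement) =====
-- stated objective: alternative
-- what changed: Instead of A's single stateful loop that appends to an accumulator and tests its emptiness, B first locates the index of the first non-blank non-magic line with next(enumerate), then joins the magic-filtered suffix lines[start:] - a stateless index-search plus slice-and-filter.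
import Mathlib
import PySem

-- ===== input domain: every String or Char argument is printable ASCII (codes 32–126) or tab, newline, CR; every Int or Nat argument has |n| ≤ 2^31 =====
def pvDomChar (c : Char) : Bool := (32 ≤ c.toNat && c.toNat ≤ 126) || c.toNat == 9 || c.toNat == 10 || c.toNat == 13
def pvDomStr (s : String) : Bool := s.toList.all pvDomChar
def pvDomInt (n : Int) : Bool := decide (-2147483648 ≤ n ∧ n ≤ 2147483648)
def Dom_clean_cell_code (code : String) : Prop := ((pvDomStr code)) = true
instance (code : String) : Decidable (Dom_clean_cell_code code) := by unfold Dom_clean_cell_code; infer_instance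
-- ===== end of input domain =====

-- B replaces A's stateful accumulation loop by an index search (first real line) and a stateless slice+filter; objective: alternative.

-- ===== PORT A =====
-- literal transliteration of A's loop: accumulator list, same branch order (strings as List Char via PySem.Chars, exact on ASCII)
def clean_cell_code (code : String) : String :=
  let lines := PySem.Chars.splitOn code.toList "\n".toList
  let cleaned_lines := lines.foldl (fun acc line =>
    let stripped := PySem.Chars.strip line
    if PySem.Chars.startswith stripped "!".toList || PySem.Chars.startswith stripped "%".toList then acc
    else if stripped = [] ∧ acc = [] then acc
    else acc ++ [line]) []
  String.ofList (PySem.Chars.join "\n".toList cleaned_lines)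

-- ===== PORT B =====
-- Source B's predicates, named: a line that survives the magic filter, and a "real" (non-blank, non-magic) line
def pvKeep (l : List Char) : Bool :=
  !(PySem.Chars.startswith (PySem.Chars.strip l) "!".toList
    || PySem.Chars.startswith (PySem.Chars.strip l) "%".toList)

def pvGood (l : List Char) : Bool :=
  !(PySem.Chars.strip l == [])
    && !(PySem.Chars.startswith (PySem.Chars.strip l) "!".toList
         || PySem.Chars.startswith (PySem.Chars.strip l) "%".toList)

-- transliteration of Source B: next(first index of a real line, default len) — findIdx?/getD — then slice lines[start:] and filter magics
def clean_cell_code_alt (code : String) : String :=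
  let lines := PySem.Chars.splitOn code.toList "\n".toList
  let start := (lines.findIdx? pvGood).getD lines.length
  String.ofList (PySem.Chars.join "\n".toList ((lines.drop start).filter pvKeep))

-- ===== PRECONDITION & SPEC =====
def Spec_clean_cell_code (code : String) (out : String) : Prop := out = clean_cell_code_alt code
instance (code : String) (out : String) : Decidable (Spec_clean_cell_code code out) := by unfold Spec_clean_cell_code; infer_instance

-- ===== CLAIM (what is proved, stated in full; the proofs are below) =====
def Claim_equal_clean_cell_code : Prop := ∀ (code : String), Dom_clean_cell_code code → Spec_clean_cell_code code (clean_cell_code code)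

-- ===== LEMMAS AND PROOFS =====

-- A's loop body, named for the lemmas
def pvStepA (acc : List (List Char)) (line : List Char) : List (List Char) :=
  let stripped := PySem.Chars.strip line
  if PySem.Chars.startswith stripped "!".toList || PySem.Chars.startswith stripped "%".toList then acc
  else if stripped = [] ∧ acc = [] then acc
  else acc ++ [line]

-- once the accumulator is nonempty, A's loop just appends every surviving line
theorem pvFoldA_nonempty (l : List (List Char)) (acc : List (List Char)) (h : acc ≠ []) :
    l.foldl pvStepA acc = acc ++ l.filter pvKeep := by
  induction l generalizing acc with
  | nil => simp
  | cons x xs ih =>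
    rw [List.foldl_cons, List.filter_cons]
    cases hm : (PySem.Chars.startswith (PySem.Chars.strip x) "!".toList
        || PySem.Chars.startswith (PySem.Chars.strip x) "%".toList) with
    | true =>
      have hkx : pvKeep x = false := by simp only [pvKeep, hm, Bool.not_true]
      simp only [pvStepA]
      rw [if_pos hm, ih acc h, hkx]
      simp
    | false =>
      have hkx : pvKeep x = true := by simp only [pvKeep, hm, Bool.not_false]
      simp only [pvStepA]
      rw [if_neg (by rw [hm]; simp), if_neg (fun hc => h hc.2), ih (acc ++ [x]) (by simp), hkx]
      simp

-- from the empty accumulator, A's loop computes B's slice-then-filter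
theorem pvFoldA_empty (l : List (List Char)) :
    l.foldl pvStepA [] = (l.drop ((l.findIdx? pvGood).getD l.length)).filter pvKeep := by
  induction l with
  | nil => simp
  | cons x xs ih =>
    rw [List.foldl_cons, List.findIdx?_cons]
    cases hm : (PySem.Chars.startswith (PySem.Chars.strip x) "!".toList
        || PySem.Chars.startswith (PySem.Chars.strip x) "%".toList) with
    | true =>
      have hg : pvGood x = false := by simp only [pvGood, hm]; simp
      simp only [pvStepA]
      rw [if_pos hm, ih, hg, if_neg (by simp)]
      cases xs.findIdx? pvGood <;> simp
    | false =>
      by_cases hb : PySem.Chars.strip x = []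
      · have hg : pvGood x = false := by simp only [pvGood, hb]; simp
        simp only [pvStepA]
        rw [if_neg (by rw [hm]; simp), if_pos ⟨hb, trivial⟩, ih, hg, if_neg (by simp)]
        cases xs.findIdx? pvGood <;> simp
      · have hg : pvGood x = true := by
          simp only [pvGood, hm]
          simp [hb]
        have hkx : pvKeep x = true := by simp only [pvKeep, hm, Bool.not_false]
        simp only [pvStepA]
        rw [if_neg (by rw [hm]; simp), if_neg (fun hc => hb hc.1),
            show ([] : List (List Char)) ++ [x] = [x] from rfl,
            pvFoldA_nonempty xs [x] (by simp), hg, if_pos rfl]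
        simp [hkx]

-- ===== VERDICT (by name: the statement is the Claim_ definition above) =====
theorem clean_cell_code_spec : Claim_equal_clean_cell_code := by
  intro code _
  show clean_cell_code code = clean_cell_code_alt code
  simp only [clean_cell_code, clean_cell_code_alt]
  rw [show (fun (acc : List (List Char)) (line : List Char) =>
    let stripped := PySem.Chars.strip line
    if PySem.Chars.startswith stripped "!".toList || PySem.Chars.startswith stripped "%".toList then acc
    else if stripped = [] ∧ acc = [] then acc
    else acc ++ [line]) = pvStepA from rfl, pvFoldA_empty]
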